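-- pv_equiv track=rewrite | github.com/OpportunV/adventofcode | 2016/day2.py | part_one
-- ===== SOURCE A (Python) =====
-- DIRECTIONS = {
--     "U": 1j,
--     "R": 1,
--     "D": -1j,
--     "L": -1
-- }
--
-- def part_one(inp):
--     code = []
--     pos = 0 + 0j
--     for line in inp:
--         for char in line:
--             new_pos = pos + DIRECTIONS[char]
--             if abs(new_pos.real) < 2 and abs(new_pos.imag) < 2:
--                 pos = new_pos
--
--         code.append(5 + int(pos.real - 3 * pos.imag))
--
--     return ''.join([str(i) for i in code])
-- ===== SOURCE B (Python) =====
-- MOVES = {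
--     1: {"R": 2, "D": 4},
--     2: {"L": 1, "R": 3, "D": 5},
--     3: {"L": 2, "D": 6},
--     4: {"U": 1, "R": 5, "D": 7},
--     5: {"U": 2, "L": 4, "R": 6, "D": 8},
--     6: {"U": 3, "L": 5, "D": 9},
--     7: {"U": 4, "R": 8},
--     8: {"U": 5, "L": 7, "R": 9},
--     9: {"U": 6, "L": 8},
-- }
--
--
-- def part_one(inp):
--     # Stage 1: turn each line into its total transition function on the 9 keys,
--     # built by composing the one-move keypad graph over all states in parallel.
--     line_fns = []
--     for line in inp:
--         fn = {s: s for s in MOVES}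
--         for ch in line:
--             fn = {s: MOVES[t].get(ch, t) for s, t in fn.items()}
--         line_fns.append(fn)
--     # Stage 2: thread the start key 5 through the line functions.
--     key, out = 5, []
--     for fn in line_fns:
--         key = fn[key]
--         out.append(str(key))
--     return "".join(out)
-- ===== Notes on version B (the rewrite author's own statement) =====
-- stated objective: alternative
-- what changed: Replaces A's per-character complex-coordinate simulation (bounds check plus the 5+int(real-3*imag) digit formula) by a two-stage table-driven computation: each line is first compiled into a total transition function on all nine keys by composing the keypad adjacency graph over every state in parallel, then the start key 5 is threaded through these line functions.
import Mathlib
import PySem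

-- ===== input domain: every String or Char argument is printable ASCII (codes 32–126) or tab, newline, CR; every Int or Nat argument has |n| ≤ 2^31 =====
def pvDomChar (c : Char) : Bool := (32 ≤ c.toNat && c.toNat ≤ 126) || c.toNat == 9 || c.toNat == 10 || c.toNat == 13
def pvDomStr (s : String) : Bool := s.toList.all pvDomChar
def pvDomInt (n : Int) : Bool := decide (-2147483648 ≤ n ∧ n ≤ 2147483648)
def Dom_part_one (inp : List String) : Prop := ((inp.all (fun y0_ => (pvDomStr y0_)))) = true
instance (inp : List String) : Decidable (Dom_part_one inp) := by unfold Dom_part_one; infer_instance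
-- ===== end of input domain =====

-- B replaces A's per-character complex-coordinate simulation with a two-stage,
-- table-driven computation: each line is first compiled into a total transition
-- function on all nine keys (composed over the keypad adjacency graph), then the
-- start key 5 is threaded through these line functions (alternative, same cost).

-- ===== PORT A =====
-- complex values are Gaussian integers throughout; pos is ported exactly as (real, imag) : Int × Int
def DIRECTIONS : PySem.Dict Char (Int × Int) :=
  PySem.Dict.ofList [('U', (0, 1)), ('R', (1, 0)), ('D', (0, -1)), ('L', (-1, 0))]

def partOneStepA (pos : Int × Int) (c : Char) : Int × Int :=
  -- DIRECTIONS[char] raises KeyError on other chars; Pre_part_one excludes those inputs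
  let d := DIRECTIONS.getD c (0, 0)
  let np : Int × Int := (pos.1 + d.1, pos.2 + d.2)
  if (-2 < np.1 ∧ np.1 < 2) ∧ (-2 < np.2 ∧ np.2 < 2) then np else pos

def lineStepA (s : (Int × Int) × List Int) (line : String) : (Int × Int) × List Int :=
  let pos := line.toList.foldl partOneStepA s.1
  (pos, s.2 ++ [5 + (pos.1 - 3 * pos.2)])

def part_one (inp : List String) : String :=
  let st := inp.foldl lineStepA ((0, 0), [])
  PySem.Str.join "" (st.2.map PySem.Int.toStr)

-- ===== PORT B =====
-- the keypad adjacency graph MOVES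
def MOVES_B : PySem.Dict Int (PySem.Dict Char Int) :=
  PySem.Dict.ofList [
    (1, PySem.Dict.ofList [('R', 2), ('D', 4)]),
    (2, PySem.Dict.ofList [('L', 1), ('R', 3), ('D', 5)]),
    (3, PySem.Dict.ofList [('L', 2), ('D', 6)]),
    (4, PySem.Dict.ofList [('U', 1), ('R', 5), ('D', 7)]),
    (5, PySem.Dict.ofList [('U', 2), ('L', 4), ('R', 6), ('D', 8)]),
    (6, PySem.Dict.ofList [('U', 3), ('L', 5), ('D', 9)]),
    (7, PySem.Dict.ofList [('U', 4), ('R', 8)]),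
    (8, PySem.Dict.ofList [('U', 5), ('L', 7), ('R', 9)]),
    (9, PySem.Dict.ofList [('U', 6), ('L', 8)])]

-- MOVES[t].get(ch, t); the outer MOVES[t] never fails: t is always one of the nine keys
def stepKeyB (c : Char) (t : Int) : Int :=
  (MOVES_B.getD t PySem.Dict.empty).getD c t

-- fn = {s: MOVES[t].get(ch, t) for s, t in fn.items()}
def charStepB (fn : PySem.Dict Int Int) (c : Char) : PySem.Dict Int Int :=
  PySem.Dict.ofList (fn.items.map (fun p => (p.1, stepKeyB c p.2)))

-- stage 1 body: line -> its total transition function, starting from {s: s for s in MOVES}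
def lineFnB (line : String) : PySem.Dict Int Int :=
  line.toList.foldl charStepB (PySem.Dict.ofList (MOVES_B.keys.map (fun s => (s, s))))

-- stage 2 body: key = fn[key]; key is always one of fn's nine keys, so lookup never fails
def lineStepB2 (s : Int × List String) (fn : PySem.Dict Int Int) : Int × List String :=
  let key := fn.getD s.1 0
  (key, s.2 ++ [PySem.Int.toStr key])

def part_one_alt (inp : List String) : String :=
  let fns := inp.map lineFnB
  let st := fns.foldl lineStepB2 (5, [])
  PySem.Str.join "" st.2

-- ===== PRECONDITION & SPEC =====
-- Pre_ excludes exactly the inputs containing a character outside "URDL", on which A's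
-- dict lookup DIRECTIONS[char] raises KeyError (B ignores such characters and returns).
def Pre_part_one (inp : List String) : Prop :=
  (inp.all fun s => s.toList.all fun c => c == 'U' || c == 'R' || c == 'D' || c == 'L') = true
instance (inp : List String) : Decidable (Pre_part_one inp) := by unfold Pre_part_one; infer_instance

def pvWitness_part_one : List String := ["UL", "RD"]

def Spec_part_one (inp : List String) (out : String) : Prop := out = part_one_alt inp
instance (inp : List String) (out : String) : Decidable (Spec_part_one inp out) := by unfold Spec_part_one; infer_instance

-- ===== CLAIM (what is proved, stated in full; the proofs are below) =====
def Claim_equal_part_one : Prop := ∀ (inp : List String), Dom_part_one inp → Pre_part_one inp → Spec_part_one inp (part_one inp)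

-- ===== LEMMAS AND PROOFS =====

/-- The nine keys, in MOVES insertion order. -/
def K9 : List Int := [1, 2, 3, 4, 5, 6, 7, 8, 9]

/-- `Dict.ofList` of a `(s, w s)`-table over the nine distinct keys keeps the items list. -/
theorem ofList_K9_items (w : Int → Int) :
    (PySem.Dict.ofList (K9.map (fun s => (s, w s)))).items = K9.map (fun s => (s, w s)) := by
  show (PySem.Dict.empty.update (K9.map (fun s => (s, w s)))).items = _
  unfold PySem.Dict.update
  rw [List.foldl_map]
  have h := PySem.Dict.items_foldl_insert_fresh K9 (fun s => s) w PySem.Dict.empty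
    (fun a _ => PySem.Dict.contains_empty a) (by decide)
  simpa using h

theorem charStepB_items (fn : PySem.Dict Int Int) (c : Char) (g : Int → Int)
    (h : fn.items = K9.map (fun s => (s, g s))) :
    (charStepB fn c).items = K9.map (fun s => (s, stepKeyB c (g s))) := by
  unfold charStepB
  rw [h, List.map_map]
  exact ofList_K9_items (fun s => stepKeyB c (g s))

/-- The char fold of stage 1 computes, for every key in parallel, the pointwise fold of `stepKeyB`. -/
theorem lineFnB_items (cs : List Char) (fn : PySem.Dict Int Int) (g : Int → Int)
    (h : fn.items = K9.map (fun s => (s, g s))) :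
    (cs.foldl charStepB fn).items =
      K9.map (fun s => (s, cs.foldl (fun t c => stepKeyB c t) (g s))) := by
  induction cs generalizing fn g with
  | nil => simpa
  | cons c cs ih =>
      simp only [List.foldl_cons]
      exact ih _ _ (charStepB_items fn c g h)

theorem getD_of_items_K9 (fn : PySem.Dict Int Int) (g : Int → Int)
    (h : fn.items = K9.map (fun s => (s, g s))) (k : Int) (hk : k ∈ K9) :
    fn.getD k 0 = g k := by
  have hmem : (k, g k) ∈ fn.items := by
    rw [h]; exact List.mem_map.2 ⟨k, hk, rfl⟩
  have hnd : fn.keys.Nodup := by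
    unfold PySem.Dict.keys
    rw [h, List.map_map]
    simpa using (by decide : K9.Nodup)
  exact PySem.Dict.getD_of_mem_items fn hmem hnd 0

/-- Correspondence between A's complex position (x=real, y=imag) and B's key digit. -/
def KeyRel (p : Int × Int) (k : Int) : Prop :=
  -1 ≤ p.1 ∧ p.1 ≤ 1 ∧ -1 ≤ p.2 ∧ p.2 ≤ 1 ∧ k = 5 + (p.1 - 3 * p.2)

theorem keyRel_mem_K9 (p : Int × Int) (k : Int) (h : KeyRel p k) : k ∈ K9 := by
  obtain ⟨h1, h2, h3, h4, h5⟩ := h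
  subst h5
  simp only [K9, List.mem_cons, List.not_mem_nil, or_false]
  omega

theorem step_rel (c : Char) (hc : c = 'U' ∨ c = 'R' ∨ c = 'D' ∨ c = 'L')
    (p : Int × Int) (k : Int) (h : KeyRel p k) :
    KeyRel (partOneStepA p c) (stepKeyB c k) := by
  obtain ⟨x, y⟩ := p
  obtain ⟨h1, h2, h3, h4, h5⟩ := h
  simp only at h1 h2 h3 h4 h5
  subst h5
  unfold KeyRel partOneStepA stepKeyB
  rcases hc with rfl | rfl | rfl | rfl <;>
    (interval_cases x <;> interval_cases y <;> decide)

theorem foldl_rel (cs : List Char) (hcs : ∀ c ∈ cs, c = 'U' ∨ c = 'R' ∨ c = 'D' ∨ c = 'L')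
    (p : Int × Int) (k : Int) (h : KeyRel p k) :
    KeyRel (cs.foldl partOneStepA p) (cs.foldl (fun t c => stepKeyB c t) k) := by
  induction cs generalizing p k with
  | nil => simpa
  | cons c cs ih =>
      simp only [List.foldl_cons]
      exact ih (fun d hd => hcs d (List.mem_cons_of_mem _ hd)) _ _
        (step_rel c (hcs c List.mem_cons_self) p k h)

/-- The two line loops stay related: positions by `KeyRel`, code lists digit by digit. -/
theorem lines_rel (inp : List String)
    (hpre : ∀ s ∈ inp, ∀ c ∈ s.toList, c = 'U' ∨ c = 'R' ∨ c = 'D' ∨ c = 'L')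
    (p : Int × Int) (k : Int) (codeA : List Int) (codeB : List String)
    (h : KeyRel p k) (hcode : codeA.map PySem.Int.toStr = codeB) :
    (inp.foldl lineStepA (p, codeA)).2.map PySem.Int.toStr =
      (inp.foldl (fun s line => lineStepB2 s (lineFnB line)) (k, codeB)).2 := by
  induction inp generalizing p k codeA codeB with
  | nil => simpa
  | cons line rest ih =>
      simp only [List.foldl_cons]
      have hfn := lineFnB_items line.toList _ (fun s => s) (ofList_K9_items (fun s => s))
      have hget : (lineFnB line).getD k 0 =
          line.toList.foldl (fun t c => stepKeyB c t) k :=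
        getD_of_items_K9 _ _ hfn k (keyRel_mem_K9 p k h)
      have hline := foldl_rel line.toList (hpre line List.mem_cons_self) p k h
      have hdig : PySem.Int.toStr (5 + ((line.toList.foldl partOneStepA p).1 -
          3 * (line.toList.foldl partOneStepA p).2)) =
          PySem.Int.toStr (line.toList.foldl (fun t c => stepKeyB c t) k) := by
        obtain ⟨_, _, _, _, h5⟩ := hline
        rw [← h5]
      simp only [lineStepA, lineStepB2, hget]
      refine ih (fun s hs => hpre s (List.mem_cons_of_mem _ hs)) _ _ _ _ hline ?_
      simp only [List.map_append, hcode, List.map_cons, List.map_nil, hdig]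

theorem part_one_eq (inp : List String) (hpre : Pre_part_one inp) :
    part_one inp = part_one_alt inp := by
  unfold Pre_part_one at hpre
  simp only [List.all_eq_true, Bool.or_eq_true, beq_iff_eq] at hpre
  replace hpre : ∀ s ∈ inp, ∀ c ∈ s.toList, c = 'U' ∨ c = 'R' ∨ c = 'D' ∨ c = 'L' := by
    intro s hs c hc; have := hpre s hs c hc; tauto
  show PySem.Str.join "" ((inp.foldl lineStepA ((0, 0), [])).2.map PySem.Int.toStr) =
    PySem.Str.join "" (((inp.map lineFnB).foldl lineStepB2 (5, []))).2
  rw [List.foldl_map]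
  have h := lines_rel inp hpre (0, 0) 5 [] [] (by unfold KeyRel; norm_num) rfl
  simp only at h ⊢
  rw [h]

-- ===== VERDICT (by name: the statement is the Claim_ definition above) =====
theorem part_one_spec : Claim_equal_part_one := by
  intro inp _ hpre
  unfold Spec_part_one
  exact part_one_eq inp hpre
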